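-- pv_equiv track=rewrite | github.com/amanambak/dual-channel | backend/app/services/schema_registry.py | _cleanup_location_phrase
-- ===== SOURCE A (Python) =====
-- def _cleanup_location_phrase(value: str) -> str:
--     tokens = value.split()
--     stop_words = {
--         "sir",
--         "mujhe",
--         "main",
--         "mai",
--         "mera",
--         "meri",
--         "mere",
--         "hum",
--         "hume",
--         "hame",
--         "ka",
--         "ki",
--         "ke",
--         "mein",
--         "me",
--         "loan",
--         "loans",
--         "chahiye",
--         "chahie",
--         "requirement",
--         "need",
--         "needed",
--         "property",
--         "ghar",
--         "flat",
--         "plot",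
--         "hai",
--         "hai",
--         "hota",
--         "hoti",
--         "ho",
--     }
--     collected: list[str] = []
--     for token in reversed(tokens):
--         if token.lower() in stop_words:
--             if collected:
--                 break
--             continue
--         collected.append(token)
--     cleaned = list(reversed(collected))
--     if len(cleaned) > 3:
--         cleaned = cleaned[-3:]
--     return " ".join(cleaned)
-- ===== SOURCE B (Python) =====
-- def _cleanup_location_phrase(value: str) -> str:
--     stop_words = {
--         "sir", "mujhe", "main", "mai", "mera", "meri", "mere", "hum",
--         "hume", "hame", "ka", "ki", "ke", "mein", "me", "loan", "loans",
--         "chahiye", "chahie", "requirement", "need", "needed", "property",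
--         "ghar", "flat", "plot", "hai", "hota", "hoti", "ho",
--     }
--     cur: list[str] = []
--     last: list[str] = []
--     for token in value.split():
--         if token.lower() in stop_words:
--             if cur:
--                 last = cur
--                 cur = []
--         else:
--             cur.append(token)
--     seg = cur if cur else last
--     return " ".join(seg[-3:])
-- ===== Notes on version B (the rewrite author's own statement) =====
-- stated objective: alternative
-- what changed: A reverse-scans the tokens with a break-flag accumulator; B makes one forward pass maintaining the current and last completed run of non-stop-word tokens, then joins the last 3 tokens of the surviving run.
import Mathlib
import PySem

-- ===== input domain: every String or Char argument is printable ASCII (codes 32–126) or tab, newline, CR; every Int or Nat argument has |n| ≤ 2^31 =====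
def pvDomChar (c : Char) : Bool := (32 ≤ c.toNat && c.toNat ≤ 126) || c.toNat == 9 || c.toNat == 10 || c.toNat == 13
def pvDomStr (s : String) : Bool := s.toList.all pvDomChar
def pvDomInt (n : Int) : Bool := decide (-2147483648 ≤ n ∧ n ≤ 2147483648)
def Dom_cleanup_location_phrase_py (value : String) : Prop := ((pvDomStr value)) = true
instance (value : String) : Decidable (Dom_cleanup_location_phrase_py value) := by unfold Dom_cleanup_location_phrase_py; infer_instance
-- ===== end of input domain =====

-- B replaces A's reverse scan with break by a single forward pass keeping the current and the
-- last completed run of non-stop-word tokens (objective: alternative decomposition, same cost).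

-- shared constant (identical literal set in both Python sources)
def pvStopWords : PySem.Set String := PySem.Set.ofList
  ["sir", "mujhe", "main", "mai", "mera", "meri", "mere", "hum", "hume", "hame",
   "ka", "ki", "ke", "mein", "me", "loan", "loans", "chahiye", "chahie",
   "requirement", "need", "needed", "property", "ghar", "flat", "plot",
   "hai", "hai", "hota", "hoti", "ho"]

-- shared test: token.lower() in stop_words (identical in both Python sources)
def pvIsStop (t : String) : Bool := PySem.Set.contains pvStopWords (PySem.Str.lower t)

-- ===== PORT A =====
-- the reversed-iteration loop with `break` / `continue`
def pvLoopA : List String → List String → List String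
  | [], collected => collected
  | t :: rest, collected =>
    if pvIsStop t then
      if collected ≠ [] then collected else pvLoopA rest collected
    else pvLoopA rest (collected ++ [t])

def cleanup_location_phrase_py (value : String) : String :=
  let tokens := PySem.Str.split₀ value
  let collected := pvLoopA tokens.reverse []
  let cleaned := collected.reverse
  let cleaned := if cleaned.length > 3 then PySem.List.slice cleaned (some (-3)) none else cleaned
  PySem.Str.join " " cleaned

-- ===== PORT B =====
-- forward fold state (cur, last): current run of non-stop tokens, last completed run
def pvStepB (st : List String × List String) (t : String) : List String × List String :=
  if pvIsStop t then
    if st.1 ≠ [] then ([], st.1) else st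
  else (st.1 ++ [t], st.2)

def cleanup_location_phrase_py_alt (value : String) : String :=
  let st := (PySem.Str.split₀ value).foldl pvStepB ([], [])
  let seg := if st.1 ≠ [] then st.1 else st.2
  PySem.Str.join " " (PySem.List.slice seg (some (-3)) none)

-- ===== PRECONDITION & SPEC =====
def Spec_cleanup_location_phrase_py (value : String) (out : String) : Prop := out = cleanup_location_phrase_py_alt value
instance (value : String) (out : String) : Decidable (Spec_cleanup_location_phrase_py value out) := by unfold Spec_cleanup_location_phrase_py; infer_instance

-- ===== CLAIM (what is proved, stated in full; the proofs are below) =====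
def Claim_equal_cleanup_location_phrase_py : Prop := ∀ (value : String), Dom_cleanup_location_phrase_py value → Spec_cleanup_location_phrase_py value (cleanup_location_phrase_py value)

-- ===== LEMMAS AND PROOFS =====

-- once collected is non-empty, A's loop appends exactly the leading non-stop run and breaks
lemma pvLoopA_nonempty (rs coll : List String) (h : coll ≠ []) :
    pvLoopA rs coll = coll ++ rs.takeWhile (fun t => !pvIsStop t) := by
  induction rs generalizing coll with
  | nil => simp [pvLoopA]
  | cons t rest ih =>
    by_cases hs : pvIsStop t
    · simp [pvLoopA, hs, h, List.takeWhile]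
    · simp [pvLoopA, hs, List.takeWhile, ih (coll ++ [t]) (by simp)]

-- invariant of B's fold, tied to A's loop on the reversed token list
lemma pvMaster (ts : List String) :
    (ts.foldl pvStepB ([], [])).1 = (ts.reverse.takeWhile (fun t => !pvIsStop t)).reverse ∧
    (if (ts.foldl pvStepB ([], [])).1 ≠ [] then (ts.foldl pvStepB ([], [])).1
     else (ts.foldl pvStepB ([], [])).2) = (pvLoopA ts.reverse []).reverse := by
  induction ts using List.reverseRecOn with
  | nil => simp [pvLoopA]
  | append_singleton us t ih =>
    obtain ⟨ih1, ih2⟩ := ih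
    simp only [List.foldl_append, List.foldl_cons, List.foldl_nil, List.reverse_append,
      List.reverse_singleton, List.singleton_append]
    by_cases hs : pvIsStop t
    · by_cases hc : (List.foldl pvStepB ([], []) us).1 = []
      · constructor
        · simp [pvStepB, hs, hc, List.takeWhile]
        · rw [show pvStepB (List.foldl pvStepB ([], []) us) t =
              List.foldl pvStepB ([], []) us by simp [pvStepB, hs, hc]]
          rw [show pvLoopA (t :: us.reverse) [] = pvLoopA us.reverse [] by
              simp [pvLoopA, hs]]
          exact ih2
      · rw [show pvStepB (List.foldl pvStepB ([], []) us) t =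
            ([], (List.foldl pvStepB ([], []) us).1) by simp [pvStepB, hs, hc]]
        constructor
        · simp [List.takeWhile, hs]
        · rw [show pvLoopA (t :: us.reverse) [] = pvLoopA us.reverse [] by
              simp [pvLoopA, hs]]
          simpa [hc] using ih2
    · rw [show pvStepB (List.foldl pvStepB ([], []) us) t =
          ((List.foldl pvStepB ([], []) us).1 ++ [t], (List.foldl pvStepB ([], []) us).2)
          by simp [pvStepB, hs]]
      constructor
      · simp [List.takeWhile, hs, ih1]
      · rw [show pvLoopA (t :: us.reverse) [] = pvLoopA us.reverse [t] by
            simp [pvLoopA, hs]]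
        rw [pvLoopA_nonempty _ [t] (by simp)]
        simp [ih1]

-- xs[-3:] is xs itself when len(xs) ≤ 3
lemma pvSlice3_short (xs : List String) (h : xs.length ≤ 3) :
    PySem.List.slice xs (some (-3)) none = xs := by
  rw [PySem.List.slice_from_neg_ofNat xs 3 (by omega)]
  have : xs.length - 3 = 0 := by omega
  simp [this]

-- ===== VERDICT (by name: the statement is the Claim_ definition above) =====
theorem cleanup_location_phrase_py_spec : Claim_equal_cleanup_location_phrase_py := by
  intro value _
  unfold Spec_cleanup_location_phrase_py cleanup_location_phrase_py cleanup_location_phrase_py_alt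
  obtain ⟨-, h2⟩ := pvMaster (PySem.Str.split₀ value)
  simp only []
  rw [← h2]
  set seg := (if ((PySem.Str.split₀ value).foldl pvStepB ([], [])).1 ≠ [] then
      ((PySem.Str.split₀ value).foldl pvStepB ([], [])).1
    else ((PySem.Str.split₀ value).foldl pvStepB ([], [])).2) with hseg
  split_ifs with hlen
  · rfl
  · rw [pvSlice3_short seg (by omega)]
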